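-- pv_equiv track=rewrite | github.com/membranegaming/finsakhi-hackathon | backend/app/services/podcast_service.py | _parse_dialogue_script
-- ===== SOURCE A (Python) =====
-- from typing import Optional, Tuple, List
--
-- def _parse_dialogue_script(script: str) -> List[Tuple[str, str]]:
--     """
--     Parse a PRIYA:/ARJUN: formatted dialogue into speaker segments.
--     Returns list of (role, text) where role is 'HOST' or 'COHOST'.
--     """
--     segments: List[Tuple[str, str]] = []
--     current_speaker: Optional[str] = None
--     current_lines: List[str] = []
--
--     for raw_line in script.split("\n"):
--         line = raw_line.strip()
--         if not line:
--             continue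
--
--         upper = line.upper()
--
--         if upper.startswith("PRIYA:"):
--             if current_speaker and current_lines:
--                 segments.append((current_speaker, " ".join(current_lines)))
--             current_speaker = "HOST"
--             text = line[6:].strip()
--             current_lines = [text] if text else []
--
--         elif upper.startswith("ARJUN:"):
--             if current_speaker and current_lines:
--                 segments.append((current_speaker, " ".join(current_lines)))
--             current_speaker = "COHOST"
--             text = line[6:].strip()
--             current_lines = [text] if text else []
--
--         elif current_speaker:
--             current_lines.append(line)
--
--     # Flush last segment
--     if current_speaker and current_lines:
--         segments.append((current_speaker, " ".join(current_lines)))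
--
--     return segments
-- ===== SOURCE B (Python) =====
-- from typing import List, Tuple
--
-- def _parse_dialogue_script(script: str) -> List[Tuple[str, str]]:
--     """
--     Parse a PRIYA:/ARJUN: formatted dialogue into speaker segments.
--
--     Scans the cleaned lines RIGHT-TO-LEFT: every label line already has its
--     continuation lines buffered below it, so each label closes a complete
--     segment immediately and no current-speaker state is needed.
--     """
--     lines = [ln for ln in (raw.strip() for raw in script.split("\n")) if ln]
--     rev_segments: List[Tuple[str, str]] = []
--     pending_rev: List[str] = []  # continuation lines below the cursor, reversed
--     for line in reversed(lines):
--         upper = line.upper()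
--         if upper.startswith("PRIYA:") or upper.startswith("ARJUN:"):
--             role = "HOST" if upper.startswith("PRIYA:") else "COHOST"
--             text = line[6:].strip()
--             body = ([text] if text else []) + pending_rev[::-1]
--             if body:
--                 rev_segments.append((role, " ".join(body)))
--             pending_rev = []
--         else:
--             pending_rev.append(line)
--     return rev_segments[::-1]
-- ===== Notes on version B (the rewrite author's own statement) =====
-- stated objective: alternative
-- what changed: B pre-filters the stripped lines and then scans them right-to-left: each label line closes a complete segment immediately from the continuation lines buffered below it, eliminating A's current_speaker tracking and flush-on-boundary logic.
import Mathlib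
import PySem

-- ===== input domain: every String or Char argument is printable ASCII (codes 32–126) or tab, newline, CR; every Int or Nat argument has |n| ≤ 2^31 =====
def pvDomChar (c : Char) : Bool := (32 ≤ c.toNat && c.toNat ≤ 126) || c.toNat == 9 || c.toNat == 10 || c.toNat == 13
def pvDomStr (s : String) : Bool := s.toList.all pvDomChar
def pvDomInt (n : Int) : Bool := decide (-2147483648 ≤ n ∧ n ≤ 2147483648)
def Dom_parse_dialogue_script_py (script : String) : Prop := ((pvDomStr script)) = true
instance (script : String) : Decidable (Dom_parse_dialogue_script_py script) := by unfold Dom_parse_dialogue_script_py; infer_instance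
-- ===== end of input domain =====

-- B pre-filters the stripped lines and scans them right-to-left, closing each segment at its
-- label line from the buffered continuation lines below it — no current-speaker state
-- (objective: alternative). A mutates nothing caller-visible; return-value equivalence only.

-- ===== PORT A =====
-- flush: `if current_speaker and current_lines: segments.append(...)` on state (segments, current_speaker, current_lines)
def pvFlush (st : List (String × String) × Option String × List String) :
    List (String × String) :=
  match st.2.1 with
  | some s => if s = "" then st.1 else if st.2.2 = [] then st.1
              else st.1 ++ [(s, PySem.Str.join " " st.2.2)]
  | none => st.1

-- loop body after `line = raw_line.strip(); if not line: continue`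
def pvStepA2 (st : List (String × String) × Option String × List String) (line : String) :
    List (String × String) × Option String × List String :=
  let upper := PySem.Str.upper line
  if PySem.Str.startswith upper "PRIYA:" then
    let text := PySem.Str.strip (PySem.Str.slice line (some 6) none)
    (pvFlush st, some "HOST", if text = "" then [] else [text])
  else if PySem.Str.startswith upper "ARJUN:" then
    let text := PySem.Str.strip (PySem.Str.slice line (some 6) none)
    (pvFlush st, some "COHOST", if text = "" then [] else [text])
  else match st.2.1 with
    | some s => if s = "" then st else (st.1, st.2.1, st.2.2 ++ [line])
    | none => st

def pvStepA (st : List (String × String) × Option String × List String) (raw : String) :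
    List (String × String) × Option String × List String :=
  let line := PySem.Str.strip raw
  if line = "" then st else pvStepA2 st line

def parse_dialogue_script_py (script : String) : List (String × String) :=
  -- script.split("\n"): split? is some since the separator is nonempty, so .getD [] is exact
  pvFlush ((((PySem.Str.split? script "\n").getD [])).foldl pvStepA ([], none, []))

-- ===== PORT B =====
-- state: (rev_segments, pending_rev); loop body of `for line in reversed(lines)`
def pvStepRev (st : List (String × String) × List String) (line : String) :
    List (String × String) × List String :=
  let upper := PySem.Str.upper line
  if PySem.Str.startswith upper "PRIYA:" || PySem.Str.startswith upper "ARJUN:" then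
    let role := if PySem.Str.startswith upper "PRIYA:" then "HOST" else "COHOST"
    let text := PySem.Str.strip (PySem.Str.slice line (some 6) none)
    let body := (if text = "" then [] else [text]) ++ st.2.reverse   -- pending_rev[::-1]
    (if body = [] then st.1 else st.1 ++ [(role, PySem.Str.join " " body)], [])
  else (st.1, st.2 ++ [line])

def parse_dialogue_script_py_alt (script : String) : List (String × String) :=
  -- lines = [ln for ln in (raw.strip() for raw in script.split("\n")) if ln]
  (((((PySem.Str.split? script "\n").getD [])).map PySem.Str.strip).filter
      (fun ln => ln ≠ "")
    |>.reverse.foldl pvStepRev ([], [])).1.reverse   -- rev_segments[::-1]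

-- ===== PRECONDITION & SPEC =====
def Spec_parse_dialogue_script_py (script : String) (out : List (String × String)) : Prop := out = parse_dialogue_script_py_alt script
instance (script : String) (out : List (String × String)) : Decidable (Spec_parse_dialogue_script_py script out) := by unfold Spec_parse_dialogue_script_py; infer_instance

-- ===== CLAIM (what is proved, stated in full; the proofs are below) =====
def Claim_equal_parse_dialogue_script_py : Prop := ∀ (script : String), Dom_parse_dialogue_script_py script → Spec_parse_dialogue_script_py script (parse_dialogue_script_py script)

-- ===== LEMMAS AND PROOFS =====

def pvIsLabel (l : String) : Bool :=
  PySem.Str.startswith (PySem.Str.upper l) "PRIYA:" ||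
  PySem.Str.startswith (PySem.Str.upper l) "ARJUN:"

def pvNL (l : String) : Bool := !pvIsLabel l           -- "not a label line"

def pvRole (l : String) : String :=
  if PySem.Str.startswith (PySem.Str.upper l) "PRIYA:" then "HOST" else "COHOST"

def pvText (l : String) : String := PySem.Str.strip (PySem.Str.slice l (some 6) none)

def pvInit (l : String) : List String := if pvText l = "" then [] else [pvText l]

-- the segment (possibly none) contributed by label line `l` followed by continuation lines `tail`
def pvSeg (l : String) (tail : List String) : List (String × String) :=
  if pvInit l ++ tail = [] then []
  else [(pvRole l, PySem.Str.join " " (pvInit l ++ tail))]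

-- reference semantics on the cleaned line list
def pvSpec : List String → List (String × String)
  | [] => []
  | l :: ls =>
    if pvIsLabel l then
      pvSeg l (ls.takeWhile pvNL) ++ pvSpec (ls.dropWhile pvNL)
    else pvSpec ls
termination_by ls => ls.length
decreasing_by
  · simpa [Nat.lt_succ_iff] using List.length_dropWhile_le pvNL ls
  · simp

theorem pvRole_ne (l : String) : pvRole l ≠ "" := by
  unfold pvRole; split <;> decide

theorem pvFlush_some (segs : List (String × String)) (r : String) (cl : List String)
    (hr : r ≠ "") :
    pvFlush (segs, some r, cl) =
      if cl = [] then segs else segs ++ [(r, PySem.Str.join " " cl)] := by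
  simp [pvFlush, hr]

theorem pvFlush_none (segs : List (String × String)) (cl : List String) :
    pvFlush (segs, none, cl) = segs := rfl

theorem pvStepA2_label (st : List (String × String) × Option String × List String)
    (l : String) (hl : pvIsLabel l = true) :
    pvStepA2 st l = (pvFlush st, some (pvRole l), pvInit l) := by
  by_cases hP : PySem.Str.startswith (PySem.Str.upper l) "PRIYA:" = true
  · simp at hP
    simp [pvStepA2, pvRole, pvInit, pvText, hP]
  · simp at hP
    have hA := by simpa [pvIsLabel, hP] using hl
    simp [pvStepA2, pvRole, pvInit, pvText, hP, hA]

theorem pvStepA2_cont_some (segs : List (String × String)) (r : String) (cl : List String)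
    (l : String) (hl : pvIsLabel l = false) (hr : r ≠ "") :
    pvStepA2 (segs, some r, cl) l = (segs, some r, cl ++ [l]) := by
  have h := by simpa [pvIsLabel] using hl
  simp [pvStepA2, h.1, h.2, hr]

theorem pvStepA2_cont_none (segs : List (String × String)) (cl : List String)
    (l : String) (hl : pvIsLabel l = false) :
    pvStepA2 (segs, none, cl) l = (segs, none, cl) := by
  have h := by simpa [pvIsLabel] using hl
  simp [pvStepA2, h.1, h.2]

theorem pvStepRev_label (st : List (String × String) × List String)
    (l : String) (hl : pvIsLabel l = true) :
    pvStepRev st l =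
      (if pvInit l ++ st.2.reverse = [] then st.1
       else st.1 ++ [(pvRole l, PySem.Str.join " " (pvInit l ++ st.2.reverse))], []) := by
  by_cases hP : PySem.Str.startswith (PySem.Str.upper l) "PRIYA:" = true
  · simp at hP
    simp [pvStepRev, pvRole, pvInit, pvText, hP]
  · simp at hP
    have hA := by simpa [pvIsLabel, hP] using hl
    simp [pvStepRev, pvRole, pvInit, pvText, hP, hA]

theorem pvStepRev_cont (st : List (String × String) × List String)
    (l : String) (hl : pvIsLabel l = false) :
    pvStepRev st l = (st.1, st.2 ++ [l]) := by
  have h := by simpa [pvIsLabel] using hl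
  simp [pvStepRev, h.1, h.2]

theorem pvSpec_dropWhile (ls : List String) :
    pvSpec (ls.dropWhile pvNL) = pvSpec ls := by
  induction ls with
  | nil => rfl
  | cons l ls ih =>
    by_cases hl : pvIsLabel l = true
    · simp [pvNL, hl]
    · have hl' : pvIsLabel l = false := by simpa using hl
      rw [List.dropWhile_cons]
      rw [pvSpec]
      simp [pvNL, hl', ih]

-- A's fold over raw lines = the fold of the stripped-line loop body over the cleaned lines
theorem pvFoldA_filter (raws : List String)
    (st : List (String × String) × Option String × List String) :
    raws.foldl pvStepA st =
      ((raws.map PySem.Str.strip).filter (fun ln => ln ≠ "")).foldl pvStepA2 st := by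
  induction raws generalizing st with
  | nil => rfl
  | cons r rs ih =>
    by_cases h : PySem.Str.strip r = ""
    · have hs : pvStepA st r = st := by simp [pvStepA, h]
      simp only [List.foldl_cons, List.map_cons, List.filter_cons, hs]
      simp [h, ih]
    · have hs : pvStepA st r = pvStepA2 st (PySem.Str.strip r) := by simp [pvStepA, h]
      simp only [List.foldl_cons, List.map_cons, List.filter_cons, hs]
      simp [h, ih]

-- A's accumulator invariant, speaker present
theorem pvA_some (ls : List String) (segs : List (String × String)) (r : String)
    (cl : List String) (hr : r ≠ "") :
    pvFlush (ls.foldl pvStepA2 (segs, some r, cl)) =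
      (segs ++
        (if cl ++ ls.takeWhile pvNL = [] then []
         else [(r, PySem.Str.join " " (cl ++ ls.takeWhile pvNL))])) ++
      pvSpec (ls.dropWhile pvNL) := by
  induction ls generalizing segs r cl with
  | nil =>
    rw [List.foldl_nil, pvFlush_some _ _ _ hr]
    simp only [List.takeWhile_nil, List.dropWhile_nil, List.append_nil, pvSpec]
    by_cases hcl : cl = [] <;> simp [hcl]
  | cons l ls ih =>
    by_cases hl : pvIsLabel l = true
    · rw [List.foldl_cons, pvStepA2_label _ _ hl, pvFlush_some _ _ _ hr,
        ih _ (pvRole l) _ (pvRole_ne l)]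
      rw [List.takeWhile_cons, List.dropWhile_cons]
      simp only [pvNL, hl, Bool.not_true, Bool.false_eq_true, if_false]
      rw [pvSpec]
      simp only [hl, if_true, pvSeg]
      by_cases hcl : cl = [] <;> simp [hcl, List.append_assoc]
    · have hl' : pvIsLabel l = false := by simpa using hl
      rw [List.foldl_cons, pvStepA2_cont_some _ _ _ _ hl' hr, ih _ _ _ hr]
      rw [List.takeWhile_cons, List.dropWhile_cons]
      simp only [pvNL, hl', Bool.not_false, if_true]
      have hrw : cl ++ [l] ++ ls.takeWhile pvNL = cl ++ l :: ls.takeWhile pvNL := by simp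
      rw [hrw]

-- A's accumulator invariant, no speaker yet
theorem pvA_none (ls : List String) (segs : List (String × String)) (cl : List String) :
    pvFlush (ls.foldl pvStepA2 (segs, none, cl)) = segs ++ pvSpec ls := by
  induction ls generalizing segs cl with
  | nil => simp [pvFlush, pvSpec]
  | cons l ls ih =>
    by_cases hl : pvIsLabel l = true
    · rw [List.foldl_cons, pvStepA2_label _ _ hl, pvFlush_none,
        pvA_some _ _ _ _ (pvRole_ne l)]
      rw [pvSpec]
      simp [hl, pvSeg]
    · have hl' : pvIsLabel l = false := by simpa using hl
      rw [List.foldl_cons, pvStepA2_cont_none _ _ _ hl', ih]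
      rw [pvSpec]
      simp [hl']

-- B's reverse-scan invariant
theorem pvB_inv (ls : List String) :
    ls.reverse.foldl pvStepRev ([], []) =
      ((pvSpec ls).reverse, (ls.takeWhile pvNL).reverse) := by
  induction ls with
  | nil => simp [pvSpec]
  | cons l ls ih =>
    rw [List.reverse_cons, List.foldl_append, ih, List.foldl_cons, List.foldl_nil]
    by_cases hl : pvIsLabel l = true
    · rw [pvStepRev_label _ _ hl]
      rw [pvSpec]
      rw [List.takeWhile_cons]
      simp only [pvNL, hl, Bool.not_true, Bool.false_eq_true, if_false, if_true,
        List.reverse_nil, List.reverse_reverse, List.reverse_append, pvSeg,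
        ← pvSpec_dropWhile ls]
      by_cases hb : pvInit l ++ ls.takeWhile pvNL = [] <;> simp [hb]
    · have hl' : pvIsLabel l = false := by simpa using hl
      rw [pvStepRev_cont _ _ hl']
      rw [pvSpec]
      rw [List.takeWhile_cons]
      simp [pvNL, hl']

-- ===== VERDICT (by name: the statement is the Claim_ definition above) =====
theorem parse_dialogue_script_py_spec : Claim_equal_parse_dialogue_script_py := by
  intro script _
  unfold Spec_parse_dialogue_script_py parse_dialogue_script_py parse_dialogue_script_py_alt
  rw [pvFoldA_filter, pvB_inv]
  simpa using
    pvA_none (((((PySem.Str.split? script "\n").getD [])).map PySem.Str.strip).filter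
      (fun ln => ln ≠ "")) [] []
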